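-- pv_equiv track=rewrite | github.com/maguianca/UBB-INFO | SEMESTRUL 1/FUNDAMENTELE PROGRAMARII/EXAMEN/REZOLVARI (programe)/10/divide_et_impera.py | prod_pare
-- ===== SOURCE A (Python) =====
-- def prod_pare(lista,st,dr):
--     if st == dr:
--         if st%2 == 0:
--             return lista[st]
--         else:
--             return 1
--     mid = (st+dr)//2
--     return prod_pare(lista,st,mid) * prod_pare(lista,mid+1,dr)
-- ===== SOURCE B (Python) =====
-- def prod_pare(lista, st, dr):
--     prod = 1
--     i = st
--     while True:
--         if i % 2 == 0:
--             prod *= lista[i]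
--         if i == dr:
--             return prod
--         i += 1
-- ===== Notes on version B (the rewrite author's own statement) =====
-- stated objective: simpler
-- what changed: Replaces the divide-and-conquer recursion with a single flat loop that walks i from st to dr once, multiplying an accumulator by lista[i] at even i.
import Mathlib
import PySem

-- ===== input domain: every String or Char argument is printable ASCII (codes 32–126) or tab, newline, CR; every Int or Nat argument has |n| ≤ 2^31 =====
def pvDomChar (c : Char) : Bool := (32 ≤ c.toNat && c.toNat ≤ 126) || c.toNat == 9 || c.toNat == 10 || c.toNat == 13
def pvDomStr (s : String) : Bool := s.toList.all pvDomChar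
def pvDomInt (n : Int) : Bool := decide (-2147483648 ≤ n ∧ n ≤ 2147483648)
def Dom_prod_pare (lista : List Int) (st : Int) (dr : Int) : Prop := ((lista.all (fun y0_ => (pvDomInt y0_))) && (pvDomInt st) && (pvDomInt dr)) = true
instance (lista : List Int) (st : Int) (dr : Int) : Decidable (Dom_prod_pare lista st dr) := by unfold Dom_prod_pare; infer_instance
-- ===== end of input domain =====

-- B replaces A's divide-and-conquer recursion by a single flat loop walking i from st to dr once; simpler, same cost.

-- ===== PORT A =====
-- A's recursion reaches its base cases only for st ≤ dr; fuel (dr - st).toNat bounds the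
-- recursion depth exactly on that domain (Pre_ requires st ≤ dr), so fuel 0 off a base case is unreachable.
def prodPareGo (lista : List Int) (st : Int) (dr : Int) (fuel : Nat) : Int :=
  if st = dr then
    if PySem.Int.mod st 2 = 0 then PySem.List.pyGetD lista st 0 else 1
  else
    match fuel with
    | 0 => 0  -- unreachable under Pre_
    | f + 1 =>
      let mid := PySem.Int.floordiv (st + dr) 2
      prodPareGo lista st mid f * prodPareGo lista (mid + 1) dr f

def prod_pare (lista : List Int) (st : Int) (dr : Int) : Int :=
  prodPareGo lista st dr (dr - st).toNat

-- ===== PORT B =====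
-- B's 'while True' loop runs exactly dr - st + 1 iterations under Pre_ (st ≤ dr and every even
-- index of st..dr a valid Python index); fuel (dr - st).toNat + 1 covers them, fuel 0 is unreachable.
def prodPareAltGo (lista : List Int) (i : Int) (dr : Int) (prod : Int) (fuel : Nat) : Int :=
  match fuel with
  | 0 => prod  -- unreachable under Pre_
  | f + 1 =>
    let prod' := if PySem.Int.mod i 2 = 0 then prod * PySem.List.pyGetD lista i 0 else prod
    if i = dr then prod' else prodPareAltGo lista (i + 1) dr prod' f

def prod_pare_alt (lista : List Int) (st : Int) (dr : Int) : Int :=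
  prodPareAltGo lista st dr 1 ((dr - st).toNat + 1)

-- ===== PRECONDITION & SPEC =====
-- Pre_: A returns exactly when st ≤ dr (otherwise the recursion raises RecursionError) and every
-- even index of the inclusive range st..dr is a valid Python index of lista (else IndexError);
-- stated via the smallest and largest even index of the interval, when one exists.
def Pre_prod_pare (lista : List Int) (st : Int) (dr : Int) : Prop :=
  st ≤ dr ∧
    ((if st % 2 = 0 then st else st + 1) ≤ dr →
      -(lista.length : Int) ≤ (if st % 2 = 0 then st else st + 1) ∧
        (if dr % 2 = 0 then dr else dr - 1) < (lista.length : Int))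
instance (lista : List Int) (st : Int) (dr : Int) : Decidable (Pre_prod_pare lista st dr) := by
  unfold Pre_prod_pare; infer_instance

def pvWitness_prod_pare : List Int × Int × Int := ([3, 4, 5, 6], 1, 3)

def Spec_prod_pare (lista : List Int) (st : Int) (dr : Int) (out : Int) : Prop := out = prod_pare_alt lista st dr
instance (lista : List Int) (st : Int) (dr : Int) (out : Int) : Decidable (Spec_prod_pare lista st dr out) := by unfold Spec_prod_pare; infer_instance

-- ===== CLAIM (what is proved, stated in full; the proofs are below) =====
def Claim_equal_prod_pare : Prop := ∀ (lista : List Int) (st : Int) (dr : Int), Dom_prod_pare lista st dr → Pre_prod_pare lista st dr → Spec_prod_pare lista st dr (prod_pare lista st dr)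

-- ===== LEMMAS AND PROOFS =====

-- proof-layer characterisation both ports are reduced to: the fold of the even-index product over st..dr
def evenProd (lista : List Int) (st : Int) (dr : Int) : Int :=
  (PySem.List.pyRange st (dr + 1) 1).foldl
    (fun prod i => if PySem.Int.mod i 2 = 0 then prod * PySem.List.pyGetD lista i 0 else prod) 1

-- the loop body distributes over the initial accumulator
theorem foldl_mul_hom (g : Int → Int) (c : Int → Prop) [DecidablePred c] :
    ∀ (l : List Int) (a : Int),
      l.foldl (fun p i => if c i then p * g i else p) a
        = a * l.foldl (fun p i => if c i then p * g i else p) 1 := by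
  intro l
  induction l with
  | nil => intro a; simp
  | cons x xs ih =>
    intro a
    simp only [List.foldl_cons]
    by_cases hx : c x
    · rw [if_pos hx, if_pos hx, ih (a * g x), ih (1 * g x), one_mul, mul_assoc]
    · rw [if_neg hx, if_neg hx, ih a]

theorem evenProd_cons (lista : List Int) (st dr : Int) (h : st ≤ dr) :
    evenProd lista st dr
      = (if PySem.Int.mod st 2 = 0 then PySem.List.pyGetD lista st 0 else 1)
          * evenProd lista (st + 1) dr := by
  unfold evenProd
  rw [PySem.List.pyRange_one_cons (by omega), List.foldl_cons,
      foldl_mul_hom (fun i => PySem.List.pyGetD lista i 0) (fun i => PySem.Int.mod i 2 = 0)]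
  by_cases h2 : PySem.Int.mod st 2 = 0
  · rw [if_pos h2, if_pos h2, one_mul]
  · rw [if_neg h2, if_neg h2]

theorem evenProd_singleton (lista : List Int) (st : Int) :
    evenProd lista st st
      = if PySem.Int.mod st 2 = 0 then PySem.List.pyGetD lista st 0 else 1 := by
  rw [evenProd_cons lista st st le_rfl]
  unfold evenProd
  rw [PySem.List.pyRange_one_eq_nil (by omega), List.foldl_nil, mul_one]

theorem evenProd_split (lista : List Int) (st mid dr : Int) (h1 : st ≤ mid) (h2 : mid < dr) :
    evenProd lista st dr = evenProd lista st mid * evenProd lista (mid + 1) dr := by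
  unfold evenProd
  rw [PySem.List.pyRange_one_append st (mid + 1) (dr + 1) (by omega) (by omega),
      List.foldl_append,
      foldl_mul_hom (fun i => PySem.List.pyGetD lista i 0) (fun i => PySem.Int.mod i 2 = 0)]

theorem goA_eq (lista : List Int) :
    ∀ (fuel : Nat) (st dr : Int), st ≤ dr → (dr - st).toNat ≤ fuel →
      prodPareGo lista st dr fuel = evenProd lista st dr := by
  intro fuel
  induction fuel with
  | zero =>
    intro st dr hle hf
    have hst : st = dr := by omega
    subst hst
    rw [prodPareGo, if_pos rfl, evenProd_singleton]
  | succ f ih =>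
    intro st dr hle hf
    by_cases heq : st = dr
    · subst heq
      rw [prodPareGo, if_pos rfl, evenProd_singleton]
    · have hlt : st < dr := by omega
      rw [prodPareGo, if_neg heq]
      obtain ⟨hm1, _⟩ := PySem.Int.floordiv_two_mid_bounds (lo := st) (hi := dr) hle
      have hmlt : PySem.Int.floordiv (st + dr) 2 < dr := by
        rw [PySem.Int.floordiv_lt_iff_lt_mul (by omega)]; omega
      show prodPareGo lista st (PySem.Int.floordiv (st + dr) 2) f *
          prodPareGo lista (PySem.Int.floordiv (st + dr) 2 + 1) dr f = evenProd lista st dr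
      have hf1 : (PySem.Int.floordiv (st + dr) 2 - st).toNat ≤ f := by omega
      have hf2 : (dr - (PySem.Int.floordiv (st + dr) 2 + 1)).toNat ≤ f := by omega
      rw [ih st _ hm1 hf1, ih _ dr (Int.add_one_le_iff.mpr hmlt) hf2]
      exact (evenProd_split lista st _ dr hm1 hmlt).symm

theorem goB_eq (lista : List Int) :
    ∀ (fuel : Nat) (i dr prod : Int), i ≤ dr → (dr - i).toNat < fuel →
      prodPareAltGo lista i dr prod fuel = prod * evenProd lista i dr := by
  intro fuel
  induction fuel with
  | zero => intro i dr prod _ hf; omega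
  | succ f ih =>
    intro i dr prod hle hf
    rw [prodPareAltGo]
    by_cases heq : i = dr
    · subst heq
      rw [if_pos rfl, evenProd_singleton]
      by_cases h2 : PySem.Int.mod i 2 = 0
      · rw [if_pos h2, if_pos h2]
      · rw [if_neg h2, if_neg h2, mul_one]
    · rw [if_neg heq, ih (i + 1) dr _ (by omega) (by omega),
          evenProd_cons lista i dr hle]
      by_cases h2 : PySem.Int.mod i 2 = 0
      · rw [if_pos h2, if_pos h2, mul_assoc]
      · rw [if_neg h2, if_neg h2, one_mul]

-- ===== VERDICT (by name: the statement is the Claim_ definition above) =====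
theorem prod_pare_spec : Claim_equal_prod_pare := by
  intro lista st dr _ hpre
  unfold Spec_prod_pare prod_pare prod_pare_alt
  rw [goA_eq lista _ st dr hpre.1 le_rfl,
      goB_eq lista _ st dr 1 hpre.1 (by omega), one_mul]
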